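-- pv_equiv track=rewrite | github.com/pasqualedem/VISTA | vista/utils.py | get_emergency_level
-- ===== SOURCE A (Python) =====
-- def get_emergency_level(label: str) -> int:
--     # Define keywords for emergency levels, 3 is highest
--     # 1 should include people helping others, 2
--     emergency_keywords = {
--         "fire": 3,
--         "smoke": 3,
--         "collapsed": 3,
--         "injured": 3,
--         "help": 2,
--         "accident": 2,
--         "needing": 2,
--         "flood": 3,
--         "trapped": 3,
--         "danger": 2,
--         "emergency": 3,
--         "helping": 1,
--         "rescue": 1,
--         "calling": 3,
--     }
--     # return max level found in label
--     max_level = 0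
--     for keyword, level in emergency_keywords.items():
--         if keyword in label.lower():
--             max_level = max(max_level, level)
--     return max_level
-- ===== SOURCE B (Python) =====
-- EMERGENCY_LEVELS = (
--     (3, ("fire", "smoke", "collapsed", "injured", "flood", "trapped", "emergency", "calling")),
--     (2, ("help", "accident", "needing", "danger")),
--     (1, ("helping", "rescue")),
-- )
--
-- def get_emergency_level(label: str) -> int:
--     text = label.lower()
--     for level, keywords in EMERGENCY_LEVELS:
--         if any(k in text for k in keywords):
--             return level
--     return 0
-- ===== Notes on version B (the rewrite author's own statement) =====
-- stated objective: simpler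
-- what changed: Replaces the keyword->level dict scan with a running max by a level-grouped table scanned from highest level down, returning the first level with a matching keyword (short-circuit, no max accumulator).
import Mathlib
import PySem

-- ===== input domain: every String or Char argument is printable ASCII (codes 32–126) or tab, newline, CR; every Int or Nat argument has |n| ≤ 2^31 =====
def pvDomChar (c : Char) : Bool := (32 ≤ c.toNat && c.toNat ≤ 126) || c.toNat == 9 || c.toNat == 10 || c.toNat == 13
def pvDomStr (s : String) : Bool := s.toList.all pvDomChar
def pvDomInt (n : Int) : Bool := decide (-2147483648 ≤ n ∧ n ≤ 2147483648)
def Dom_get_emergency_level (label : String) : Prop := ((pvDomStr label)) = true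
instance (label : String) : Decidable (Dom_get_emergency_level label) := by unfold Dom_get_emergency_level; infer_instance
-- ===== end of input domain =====

-- B replaces A's dict scan with a running max by a level-grouped table scanned from
-- highest level down, returning the first matching level (objective: simpler).

-- ===== PORT A =====
-- the dict literal, in insertion order
def pvEmergencyKeywords : List (String × Int) :=
  [("fire", 3), ("smoke", 3), ("collapsed", 3), ("injured", 3), ("help", 2),
   ("accident", 2), ("needing", 2), ("flood", 3), ("trapped", 3), ("danger", 2),
   ("emergency", 3), ("helping", 1), ("rescue", 1), ("calling", 3)]

def get_emergency_level (label : String) : Int :=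
  -- for keyword, level in …: if keyword in label.lower(): max_level = max(max_level, level)
  pvEmergencyKeywords.foldl
    (fun max_level kl =>
      if PySem.Str.isIn kl.1 (PySem.Str.lower label) then max max_level kl.2 else max_level)
    0

-- ===== PORT B =====
def pvEmergencyLevels : List (Int × List String) :=
  [(3, ["fire", "smoke", "collapsed", "injured", "flood", "trapped", "emergency", "calling"]),
   (2, ["help", "accident", "needing", "danger"]),
   (1, ["helping", "rescue"])]

-- for level, keywords in EMERGENCY_LEVELS: if any(k in text for k in keywords): return level
def pvFirstMatchingLevel (text : String) : List (Int × List String) → Int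
  | [] => 0
  | (level, kws) :: rest =>
      if kws.any (fun k => PySem.Str.isIn k text) then level
      else pvFirstMatchingLevel text rest

def get_emergency_level_alt (label : String) : Int :=
  pvFirstMatchingLevel (PySem.Str.lower label) pvEmergencyLevels

-- ===== PRECONDITION & SPEC =====
def Spec_get_emergency_level (label : String) (out : Int) : Prop := out = get_emergency_level_alt label
instance (label : String) (out : Int) : Decidable (Spec_get_emergency_level label out) := by unfold Spec_get_emergency_level; infer_instance

-- ===== CLAIM (what is proved, stated in full; the proofs are below) =====
def Claim_equal_get_emergency_level : Prop := ∀ (label : String), Dom_get_emergency_level label → Spec_get_emergency_level label (get_emergency_level label)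

-- ===== LEMMAS AND PROOFS =====

-- max over the matched entries of an association list (0 if none match)
def pvMxS (t : String) : List (String × Int) → Int
  | [] => 0
  | kl :: l => max (if PySem.Str.isIn kl.1 t then kl.2 else 0) (pvMxS t l)

-- A's running-max fold computes max of the accumulator and pvMxS
theorem pv_fold_eq (t : String) : ∀ (l : List (String × Int)) (m : Int), 0 ≤ m →
    List.foldl
      (fun max_level kl => if PySem.Str.isIn kl.1 t then max max_level kl.2 else max_level)
      m l = max m (pvMxS t l)
  | [], m, hm => by simp [pvMxS]; omega
  | kl :: l, m, hm => by
      simp only [List.foldl, pvMxS]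
      by_cases h : PySem.Str.isIn kl.1 t
      · rw [if_pos h, if_pos h, pv_fold_eq t l (max m kl.2) (le_trans hm (le_max_left _ _))]
        omega
      · rw [if_neg h, if_neg h, pv_fold_eq t l m hm]
        omega

-- regroup a 14-term max chain into the three level groups (pure max arithmetic)
theorem pv_shuffle (a1 a2 a3 a4 a5 a6 a7 a8 a9 a10 a11 a12 a13 a14 : Int) :
    max 0 (max a1 (max a2 (max a3 (max a4 (max a5 (max a6 (max a7 (max a8 (max a9
      (max a10 (max a11 (max a12 (max a13 (max a14 0)))))))))))))) =
    max 0 (max (max a1 (max a2 (max a3 (max a4 (max a8 (max a9 (max a11 a14)))))))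
          (max (max a5 (max a6 (max a7 a10))) (max (max a12 a13) 0))) := by ac_rfl

-- each level group collapses to an if over the disjunction of its tests
theorem pv_g3 (b1 b2 b3 b4 b5 b6 b7 b8 : Bool) :
    max (if b1 then (3:Int) else 0) (max (if b2 then 3 else 0) (max (if b3 then 3 else 0)
      (max (if b4 then 3 else 0) (max (if b5 then 3 else 0) (max (if b6 then 3 else 0)
      (max (if b7 then 3 else 0) (if b8 then 3 else 0)))))))
    = if b1 || b2 || b3 || b4 || b5 || b6 || b7 || b8 then 3 else 0 := by
  revert b1 b2 b3 b4 b5 b6 b7 b8; decide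

theorem pv_g2 (b1 b2 b3 b4 : Bool) :
    max (if b1 then (2:Int) else 0) (max (if b2 then 2 else 0) (max (if b3 then 2 else 0)
      (if b4 then 2 else 0)))
    = if b1 || b2 || b3 || b4 then 2 else 0 := by
  revert b1 b2 b3 b4; decide

theorem pv_g1 (b1 b2 : Bool) :
    max (if b1 then (1:Int) else 0) (if b2 then 1 else 0)
    = if b1 || b2 then 1 else 0 := by
  revert b1 b2; decide

theorem pv_final (a3 a2 a1 : Bool) :
    max 0 (max (if a3 then (3:Int) else 0) (max (if a2 then 2 else 0) (max (if a1 then 1 else 0) 0)))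
    = if a3 then 3 else if a2 then 2 else if a1 then 1 else 0 := by
  revert a3 a2 a1; decide

-- ===== VERDICT (by name: the statement is the Claim_ definition above) =====
theorem get_emergency_level_spec : Claim_equal_get_emergency_level := by
  intro label _
  unfold Spec_get_emergency_level get_emergency_level get_emergency_level_alt
  rw [pv_fold_eq (PySem.Str.lower label) pvEmergencyKeywords 0 le_rfl]
  simp only [pvEmergencyKeywords, pvEmergencyLevels, pvMxS, pvFirstMatchingLevel,
    List.any_cons, List.any_nil, Bool.or_false]
  generalize PySem.Str.isIn "fire" (PySem.Str.lower label) = c1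
  generalize PySem.Str.isIn "smoke" (PySem.Str.lower label) = c2
  generalize PySem.Str.isIn "collapsed" (PySem.Str.lower label) = c3
  generalize PySem.Str.isIn "injured" (PySem.Str.lower label) = c4
  generalize PySem.Str.isIn "help" (PySem.Str.lower label) = c5
  generalize PySem.Str.isIn "accident" (PySem.Str.lower label) = c6
  generalize PySem.Str.isIn "needing" (PySem.Str.lower label) = c7
  generalize PySem.Str.isIn "flood" (PySem.Str.lower label) = c8
  generalize PySem.Str.isIn "trapped" (PySem.Str.lower label) = c9
  generalize PySem.Str.isIn "danger" (PySem.Str.lower label) = c10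
  generalize PySem.Str.isIn "emergency" (PySem.Str.lower label) = c11
  generalize PySem.Str.isIn "helping" (PySem.Str.lower label) = c12
  generalize PySem.Str.isIn "rescue" (PySem.Str.lower label) = c13
  generalize PySem.Str.isIn "calling" (PySem.Str.lower label) = c14
  rw [pv_shuffle, pv_g3, pv_g2, pv_g1, pv_final]
  simp [Bool.or_assoc]
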